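-- pv_equiv track=rewrite | github.com/lherron2/seed-from-alignment | refine_unpaired_regions.py | find_unpaired_runs
-- ===== SOURCE A (Python) =====
-- from typing import Dict, List, Sequence, Tuple
--
-- UNPAIRED_CHAR = "."
--
-- def find_unpaired_runs(struct: str, min_len: int) -> List[Tuple[int, int]]:
--     """
--     Find contiguous runs of '.' in the structure with length >= min_len.
--
--     Returns a list of (start, end) indices in Python slice convention:
--         struct[start:end] is the unpaired region, length = end - start.
--     """
--     runs: List[Tuple[int, int]] = []
--     n = len(struct)
--     i = 0
--     while i < n:
--         if struct[i] == UNPAIRED_CHAR: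
--             start = i
--             while i < n and struct[i] == UNPAIRED_CHAR:
--                 i += 1
--             if (i - start) >= min_len:
--                 runs.append((start, i))
--         else:
--             i += 1
--     return runs
-- ===== SOURCE B (Python) =====
-- def find_unpaired_runs(struct, min_len):
--     """Boundary detection: a run starts at i if struct[i]=='.' and no '.' before it;
--     it ends after i if struct[i]=='.' and no '.' after it. The k-th start pairs with
--     the k-th end; keep pairs spanning at least min_len."""
--     n = len(struct)
--     starts = [i for i in range(n)
--               if struct[i] == "." and (i == 0 or struct[i - 1] != ".")]
--     ends = [i + 1 for i in range(n)
--             if struct[i] == "." and (i == n - 1 or struct[i + 1] != ".")]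
--     return [(s, e) for s, e in zip(starts, ends) if e - s >= min_len]
-- ===== Notes on version B (the rewrite author's own statement) =====
-- stated objective: alternative
-- what changed: Replaced A's two-pointer run-length scan with boundary detection: two index comprehensions compute all run starts (dot with no dot before) and all run ends (dot with no dot after), which are zipped positionally and filtered by length.
import Mathlib
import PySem

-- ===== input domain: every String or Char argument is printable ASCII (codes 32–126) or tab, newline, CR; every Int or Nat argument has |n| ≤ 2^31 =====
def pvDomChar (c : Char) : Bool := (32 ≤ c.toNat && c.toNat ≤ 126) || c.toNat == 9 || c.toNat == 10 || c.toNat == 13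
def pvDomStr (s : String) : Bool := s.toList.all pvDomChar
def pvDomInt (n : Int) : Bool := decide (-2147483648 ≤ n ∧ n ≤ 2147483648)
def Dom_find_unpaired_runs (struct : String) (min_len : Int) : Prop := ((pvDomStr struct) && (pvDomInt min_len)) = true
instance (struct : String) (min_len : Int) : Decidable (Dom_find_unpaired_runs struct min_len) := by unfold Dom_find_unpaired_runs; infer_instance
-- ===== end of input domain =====

-- B replaces A's two-pointer run-length scan by boundary detection: the lists of all
-- run starts and all run ends are computed separately, zipped, and filtered by length
-- (alternative algorithm, same complexity).

-- ===== PORT A =====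
-- inner while loop of A: count the leading run of '.' and return the remaining chars
def pvSpanDots : List Char → Nat × List Char
  | [] => (0, [])
  | c :: cs => if c = '.' then ((pvSpanDots cs).1 + 1, (pvSpanDots cs).2) else (0, c :: cs)

theorem pvSpanDots_len_le : ∀ cs : List Char, (pvSpanDots cs).2.length ≤ cs.length := by
  intro cs
  induction cs with
  | nil => simp [pvSpanDots]
  | cons c cs ih =>
    by_cases h : c = '.'
    · simp [pvSpanDots, h]; omega
    · simp [pvSpanDots, h]

-- outer while loop of A
def pvGoA (m : Int) : List Char → Int → List (Int × Int)
  | [], _ => []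
  | c :: cs, i =>
    if c = '.' then
      if (((pvSpanDots cs).1 + 1 : Nat) : Int) ≥ m then
        (i, i + ((pvSpanDots cs).1 + 1 : Nat)) :: pvGoA m (pvSpanDots cs).2 (i + ((pvSpanDots cs).1 + 1 : Nat))
      else pvGoA m (pvSpanDots cs).2 (i + ((pvSpanDots cs).1 + 1 : Nat))
    else pvGoA m cs (i + 1)
termination_by cs => cs.length
decreasing_by
  · exact Nat.lt_succ_of_le (pvSpanDots_len_le cs)
  · exact Nat.lt_succ_of_le (pvSpanDots_len_le cs)
  · simp

def find_unpaired_runs (struct : String) (min_len : Int) : List (Int × Int) :=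
  pvGoA min_len struct.toList 0

-- ===== PORT B =====
-- [i for i in range(n) if struct[i]=='.' and (i==0 or struct[i-1]!='.')]
-- exact: the test 'i==0 or struct[i-1]!="."' is carried as the flag pd = "char i-1 was '.'"
def pvStarts : List Char → Int → Bool → List Int
  | [], _, _ => []
  | c :: cs, i, pd =>
    if c = '.' ∧ pd = false then i :: pvStarts cs (i + 1) (c == '.')
    else pvStarts cs (i + 1) (c == '.')

-- [i+1 for i in range(n) if struct[i]=='.' and (i==n-1 or struct[i+1]!='.')]
-- exact: struct[i+1] is the head of the remaining list
def pvEnds : List Char → Int → List Int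
  | [], _ => []
  | c :: cs, i =>
    if c = '.' ∧ cs.head? ≠ some '.' then (i + 1) :: pvEnds cs (i + 1)
    else pvEnds cs (i + 1)

def find_unpaired_runs_alt (struct : String) (min_len : Int) : List (Int × Int) :=
  ((pvStarts struct.toList 0 false).zip (pvEnds struct.toList 0)).filter
    (fun p => p.2 - p.1 ≥ min_len)

-- ===== PRECONDITION & SPEC =====
def Spec_find_unpaired_runs (struct : String) (min_len : Int) (out : List (Int × Int)) : Prop := out = find_unpaired_runs_alt struct min_len
instance (struct : String) (min_len : Int) (out : List (Int × Int)) : Decidable (Spec_find_unpaired_runs struct min_len out) := by unfold Spec_find_unpaired_runs; infer_instance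

-- ===== CLAIM (what is proved, stated in full; the proofs are below) =====
def Claim_equal_find_unpaired_runs : Prop := ∀ (struct : String) (min_len : Int), Dom_find_unpaired_runs struct min_len → Spec_find_unpaired_runs struct min_len (find_unpaired_runs struct min_len)

-- ===== LEMMAS AND PROOFS =====

theorem pvSpanDots_eq (cs : List Char) :
    pvSpanDots cs = ((cs.takeWhile (· == '.')).length, cs.dropWhile (· == '.')) := by
  induction cs with
  | nil => simp [pvSpanDots]
  | cons c cs ih =>
    by_cases h : c = '.'
    · simp [pvSpanDots, h, ih]
    · simp [pvSpanDots, h]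

theorem head?_dropWhile_dot (cs : List Char) :
    (cs.dropWhile (· == '.')).head? ≠ some '.' := by
  induction cs with
  | nil => simp
  | cons c cs ih =>
    by_cases h : c = '.'
    · have hc : (c == '.') = true := by simp [h]
      simpa [List.dropWhile, hc] using ih
    · have hc : (c == '.') = false := by simp [h]
      simp [List.dropWhile, hc, h]

-- skipping a non-dot char
theorem pvStarts_skip (c : Char) (hc : ¬ c = '.') (cs : List Char) (i : Int) (pd : Bool) :
    pvStarts (c :: cs) i pd = pvStarts cs (i + 1) false := by
  have hc' : (c == '.') = false := by simp [hc]
  simp [pvStarts, hc, hc']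

theorem pvEnds_skip (c : Char) (hc : ¬ c = '.') (cs : List Char) (i : Int) :
    pvEnds (c :: cs) i = pvEnds cs (i + 1) := by
  simp [pvEnds, hc]

-- after the first dot, the remainder of a dot run contributes no starts
theorem pvStarts_run_tail (run : List Char) (hall : ∀ x ∈ run, x = '.') (rest : List Char)
    (hrest : rest.head? ≠ some '.') (j : Int) :
    pvStarts (run ++ rest) j true = pvStarts rest (j + run.length) false := by
  induction run generalizing j with
  | nil =>
    match rest with
    | [] => simp [pvStarts]
    | c :: cs =>
      have hc : ¬ c = '.' := by simpa using hrest
      simp [pvStarts_skip c hc]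
  | cons d run ih =>
    have hd : d = '.' := hall d (by simp)
    rw [List.cons_append, pvStarts, if_neg (by simp), hd]
    simp only [beq_self_eq_true]
    rw [ih (fun x hx => hall x (by simp [hx])) (j + 1)]
    congr 1
    simp only [List.length_cons]
    push_cast
    ring

-- a maximal dot run contributes exactly one start (its first index)
theorem pvStarts_run (run : List Char) (hne : run ≠ []) (hall : ∀ x ∈ run, x = '.')
    (rest : List Char) (hrest : rest.head? ≠ some '.') (i : Int) :
    pvStarts (run ++ rest) i false = i :: pvStarts rest (i + run.length) false := by
  match run with
  | [] => exact absurd rfl hne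
  | d :: run =>
    have hd : d = '.' := hall d (by simp)
    rw [List.cons_append, pvStarts, if_pos (by simp [hd]), hd]
    simp only [beq_self_eq_true]
    rw [pvStarts_run_tail run (fun x hx => hall x (by simp [hx])) rest hrest (i + 1)]
    congr 2
    simp only [List.length_cons]
    push_cast
    ring

-- a maximal dot run contributes exactly one end (just past its last index)
theorem pvEnds_run (run : List Char) (hne : run ≠ []) (hall : ∀ x ∈ run, x = '.')
    (rest : List Char) (hrest : rest.head? ≠ some '.') (i : Int) :
    pvEnds (run ++ rest) i = (i + run.length) :: pvEnds rest (i + run.length) := by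
  induction run generalizing i with
  | nil => exact absurd rfl hne
  | cons d run ih =>
    have hd : d = '.' := hall d (by simp)
    match run with
    | [] =>
      have : rest.head? ≠ some '.' := hrest
      rw [List.cons_append, List.nil_append, pvEnds, if_pos (by simp [hd, this])]
      simp
    | e :: run' =>
      have he : e = '.' := hall e (by simp)
      rw [List.cons_append, pvEnds, if_neg (by simp [he])]
      rw [ih (by simp) (fun x hx => hall x (by simp [hx])) (i + 1)]
      have harith : i + 1 + ((e :: run').length : Int) = i + ((d :: e :: run').length : Int) := by
        simp only [List.length_cons]; push_cast; ring
      rw [harith]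

theorem main_eq (m : Int) :
    ∀ (n : Nat) (cs : List Char), cs.length ≤ n → ∀ i,
      ((pvStarts cs i false).zip (pvEnds cs i)).filter (fun p => p.2 - p.1 ≥ m) =
        pvGoA m cs i := by
  intro n
  induction n with
  | zero =>
    intro cs hlen i
    have : cs = [] := List.eq_nil_of_length_eq_zero (Nat.le_zero.mp hlen)
    subst this; simp [pvStarts, pvEnds, pvGoA]
  | succ n ih =>
    intro cs hlen i
    match cs with
    | [] => simp [pvStarts, pvEnds, pvGoA]
    | c :: cs =>
      by_cases h : c = '.'
      · subst h
        set run : List Char := '.' :: cs.takeWhile (· == '.') with hrun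
        set rest : List Char := cs.dropWhile (· == '.') with hrestdef
        have hsplit : ('.' : Char) :: cs = run ++ rest := by
          simp [hrun, hrestdef, List.takeWhile_append_dropWhile]
        have hall : ∀ x ∈ run, x = '.' := by
          intro x hx
          rcases List.mem_cons.mp hx with h1 | h2
          · exact h1
          · simpa using List.mem_takeWhile_imp h2
        have hrest : rest.head? ≠ some '.' := head?_dropWhile_dot cs
        have hlen' : rest.length ≤ n := by
          rw [hrestdef]
          have := List.length_dropWhile_le (· == '.') cs
          simp at hlen; omega
        rw [hsplit, pvStarts_run run (by simp [hrun]) hall rest hrest i,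
            pvEnds_run run (by simp [hrun]) hall rest hrest i]
        have hk : (run.length : Int) = ((pvSpanDots cs).1 + 1 : Nat) := by
          simp [hrun, pvSpanDots_eq]
        rw [← hsplit]
        rw [pvGoA, if_pos rfl]
        simp only [List.zip_cons_cons, List.filter_cons]
        rw [ih rest hlen' (i + run.length)]
        by_cases hm : (((pvSpanDots cs).1 + 1 : Nat) : Int) ≥ m
        · rw [if_pos hm, if_pos (by simp; omega)]
          rw [hk]
          congr 1
          simp [hrestdef, pvSpanDots_eq]
        · rw [if_neg hm, if_neg (by simp; omega)]
          rw [hk]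
          simp [hrestdef, pvSpanDots_eq]
      · rw [pvStarts_skip c h, pvEnds_skip c h, ih cs (by simp at hlen; omega) (i + 1)]
        rw [pvGoA]; simp [h]

-- ===== VERDICT (by name: the statement is the Claim_ definition above) =====
theorem find_unpaired_runs_spec : Claim_equal_find_unpaired_runs := by
  intro struct min_len _
  unfold Spec_find_unpaired_runs find_unpaired_runs find_unpaired_runs_alt
  exact (main_eq min_len struct.toList.length struct.toList le_rfl 0).symm
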